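-- pv_equiv track=rewrite | github.com/roadswitcher/advent_of_code_2025 | day1/day1.py | count_zero_crossings
-- ===== SOURCE A (Python) =====
-- def count_zero_crossings(start, steps, direction, total_positions=100):
--     """Count how many times we click through zero."""
--     count = 0
--     for i in range(1, steps + 1):
--         if direction == 'L':
--             pos = (start + i) % total_positions
--         else:
--             pos = (start - i + total_positions) % total_positions
--
--         if pos == 0:
--             count += 1
--
--     return count
-- ===== SOURCE B (Python) =====
-- def count_zero_crossings(start, steps, direction, total_positions=100):
--     """Count how many times we click through zero (closed form, O(1))."""
--     if steps <= 0:
--         return 0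
--     m = abs(total_positions)
--     # position hits zero at step i iff i == c (mod m)
--     c = (-start if direction == 'L' else start) % m
--     return (steps - c) // m - (-c) // m
-- ===== Notes on version B (the rewrite author's own statement) =====
-- stated objective: faster
-- what changed: Replaces the step-by-step simulation loop over range(1, steps+1) by a closed-form count of the i in [1, steps] congruent to +/-start modulo |total_positions|, computed with two floor divisions.
import Mathlib
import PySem

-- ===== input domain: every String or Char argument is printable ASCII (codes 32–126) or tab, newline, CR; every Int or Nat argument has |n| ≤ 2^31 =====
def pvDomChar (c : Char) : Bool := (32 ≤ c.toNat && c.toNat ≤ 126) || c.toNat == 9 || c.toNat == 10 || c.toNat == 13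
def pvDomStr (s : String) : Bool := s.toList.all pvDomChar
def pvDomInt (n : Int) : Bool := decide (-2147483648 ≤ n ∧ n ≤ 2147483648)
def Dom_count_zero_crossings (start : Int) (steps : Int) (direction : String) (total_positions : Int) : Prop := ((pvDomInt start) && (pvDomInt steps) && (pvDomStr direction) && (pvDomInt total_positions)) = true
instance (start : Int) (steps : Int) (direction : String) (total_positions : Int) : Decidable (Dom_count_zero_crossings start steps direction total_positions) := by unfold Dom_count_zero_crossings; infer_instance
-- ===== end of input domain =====

-- B replaces A's step-by-step simulation loop by a closed-form O(1) count of the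
-- steps i in [1, steps] congruent to ±start modulo |total_positions| (faster, asymptotic).


-- ===== PORT A =====
def count_zero_crossings (start : Int) (steps : Int) (direction : String) (total_positions : Int) : Int :=
  (PySem.List.pyRange 1 (steps + 1) 1).foldl (fun count i =>
    let pos := if direction == "L"
      then PySem.Int.mod (start + i) total_positions
      else PySem.Int.mod (start - i + total_positions) total_positions
    if pos = 0 then count + 1 else count) 0

-- ===== PORT B =====
def count_zero_crossings_alt (start : Int) (steps : Int) (direction : String) (total_positions : Int) : Int :=
  if steps ≤ 0 then 0
  else
    let m : Int := |total_positions|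
    let c : Int := PySem.Int.mod (if direction == "L" then -start else start) m
    PySem.Int.floordiv (steps - c) m - PySem.Int.floordiv (-c) m

-- ===== PRECONDITION & SPEC =====
-- Pre_ excludes exactly the inputs on which Python A raises ZeroDivisionError:
-- total_positions = 0 with at least one loop iteration (steps ≥ 1).
def Pre_count_zero_crossings (start : Int) (steps : Int) (direction : String) (total_positions : Int) : Prop :=
  total_positions ≠ 0 ∨ steps < 1
instance (start : Int) (steps : Int) (direction : String) (total_positions : Int) : Decidable (Pre_count_zero_crossings start steps direction total_positions) := by unfold Pre_count_zero_crossings; infer_instance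
def pvWitness_count_zero_crossings : Int × Int × String × Int := (7, 20, "L", 10)

def Spec_count_zero_crossings (start : Int) (steps : Int) (direction : String) (total_positions : Int) (out : Int) : Prop := out = count_zero_crossings_alt start steps direction total_positions
instance (start : Int) (steps : Int) (direction : String) (total_positions : Int) (out : Int) : Decidable (Spec_count_zero_crossings start steps direction total_positions out) := by unfold Spec_count_zero_crossings; infer_instance

-- ===== CLAIM (what is proved, stated in full; the proofs are below) =====
def Claim_equal_count_zero_crossings : Prop := ∀ (start : Int) (steps : Int) (direction : String) (total_positions : Int), Dom_count_zero_crossings start steps direction total_positions → Pre_count_zero_crossings start steps direction total_positions → Spec_count_zero_crossings start steps direction total_positions (count_zero_crossings start steps direction total_positions)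

-- ===== LEMMAS AND PROOFS =====

-- floor division steps by one against a positive divisor
theorem fdiv_succ (m x : Int) (hm : 0 < m) :
    PySem.Int.floordiv (x + 1) m
      = PySem.Int.floordiv x m + (if m ∣ (x + 1) then 1 else 0) := by
  rw [PySem.Int.floordiv_eq_ediv_of_pos hm, PySem.Int.floordiv_eq_ediv_of_pos hm]
  set q := x / m with hq
  set r := x % m with hr
  have h0 : m * q + r = x := Int.mul_ediv_add_emod x m
  have h1 : 0 ≤ r := Int.emod_nonneg x (by omega)
  have h2 : r < m := Int.emod_lt_of_pos x hm
  by_cases hd : r = m - 1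
  · have hx : x + 1 = m * (q + 1) := by rw [mul_add, mul_one]; linarith
    have hdvd : m ∣ (x + 1) := Dvd.intro _ hx.symm
    have he : (x + 1) / m = q + 1 := by
      rw [hx, Int.mul_ediv_cancel_left _ (by omega : m ≠ 0)]
    simp [he, hdvd]
  · have hx : x + 1 = (r + 1) + q * m := by linarith [mul_comm m q]
    have hdvd : ¬ m ∣ (x + 1) := by
      rintro ⟨k, hk⟩
      have hrk : m ∣ (r + 1) := ⟨k - q, by rw [mul_sub]; linarith⟩
      have := Int.le_of_dvd (by omega) hrk
      omega
    have he : (x + 1) / m = q := by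
      rw [hx, Int.add_mul_ediv_right _ _ (by omega : m ≠ 0),
        Int.ediv_eq_zero_of_lt (by omega) (by omega)]
      omega
    simp [he, hdvd]

-- the position at step i is zero iff |T| divides i - c
theorem pos_zero_iff (start i T : Int) (direction : String) (hT : T ≠ 0) :
    ((if direction == "L"
        then PySem.Int.mod (start + i) T
        else PySem.Int.mod (start - i + T) T) = 0)
      ↔ |T| ∣ (i - PySem.Int.mod (if direction == "L" then -start else start) |T|) := by
  have hm : (0:Int) < |T| := abs_pos.mpr hT
  by_cases hdL : (direction == "L") = true
  · simp only [hdL, if_true]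
    rw [PySem.Int.mod_eq_zero_iff_dvd _ _, ← abs_dvd,
      Int.dvd_iff_emod_eq_zero, Int.dvd_iff_emod_eq_zero]
    have key : (i - PySem.Int.mod (-start) |T|) % |T| = (start + i) % |T| := by
      rw [PySem.Int.mod_eq_emod_of_pos hm, Int.sub_emod, Int.emod_emod_of_dvd _ dvd_rfl,
        ← Int.sub_emod]
      congr 1; ring
    rw [key]
  · have hT2 : |T| ∣ T := (abs_dvd T T).mpr dvd_rfl
    simp only [Bool.not_eq_true] at hdL
    simp only [hdL, Bool.false_eq_true, if_false]
    rw [PySem.Int.mod_eq_zero_iff_dvd _ _, ← abs_dvd]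
    have e1 : start - i + T = T + -(i - start) := by ring
    rw [e1, dvd_add_right hT2, dvd_neg,
      Int.dvd_iff_emod_eq_zero, Int.dvd_iff_emod_eq_zero]
    have key : (i - PySem.Int.mod start |T|) % |T| = (i - start) % |T| := by
      rw [PySem.Int.mod_eq_emod_of_pos hm, Int.sub_emod, Int.emod_emod_of_dvd _ dvd_rfl,
        ← Int.sub_emod]
    rw [key]

-- A's loop on the first n steps equals B's closed form
theorem loop_closed (start T : Int) (direction : String) (hT : T ≠ 0) (n : Nat) :
    ((PySem.List.pyRange 1 ((n : Int) + 1) 1).foldl (fun count i =>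
        let pos := if direction == "L"
          then PySem.Int.mod (start + i) T
          else PySem.Int.mod (start - i + T) T
        if pos = 0 then count + 1 else count) 0)
      = PySem.Int.floordiv ((n : Int) - PySem.Int.mod (if direction == "L" then -start else start) |T|) |T|
        - PySem.Int.floordiv (-(PySem.Int.mod (if direction == "L" then -start else start) |T|)) |T| := by
  have hm : (0:Int) < |T| := abs_pos.mpr hT
  set c := PySem.Int.mod (if direction == "L" then -start else start) |T| with hc
  induction n with
  | zero =>
    rw [PySem.List.pyRange_one_eq_nil (by norm_num)]
    simp
  | succ k ih =>
    have hsplit : PySem.List.pyRange 1 ((k:Int) + 1 + 1) 1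
        = PySem.List.pyRange 1 ((k:Int) + 1) 1 ++ [(k:Int) + 1] := by
      have := PySem.List.pyRange_one_succ_right (a := 1) (b := (k:Int) + 1) (by omega)
      exact this
    push_cast
    rw [hsplit, List.foldl_append, ih]
    simp only [List.foldl_cons, List.foldl_nil]
    have hiff := pos_zero_iff start ((k:Int) + 1) T direction hT
    rw [← hc] at hiff
    have hstep := fdiv_succ |T| ((k:Int) - c) hm
    have harg : (k:Int) - c + 1 = (k:Int) + 1 - c := by ring
    rw [harg] at hstep
    by_cases hz : (if direction == "L"
          then PySem.Int.mod (start + ((k:Int)+1)) T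
          else PySem.Int.mod (start - ((k:Int)+1) + T) T) = 0
    · have hdvd : |T| ∣ ((k:Int) + 1 - c) := hiff.mp hz
      simp only [hz, if_true] at *
      rw [hstep]; simp [hdvd]; ring
    · have hdvd : ¬ |T| ∣ ((k:Int) + 1 - c) := fun h => hz (hiff.mpr h)
      simp only [hz, if_false] at *
      rw [hstep]; simp [hdvd]

-- ===== VERDICT (by name: the statement is the Claim_ definition above) =====
theorem count_zero_crossings_spec : Claim_equal_count_zero_crossings := by
  intro start steps direction total_positions _ hpre
  unfold Spec_count_zero_crossings count_zero_crossings count_zero_crossings_alt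
  by_cases hs : steps ≤ 0
  · rw [PySem.List.pyRange_one_eq_nil (by omega)]
    simp [hs]
  · have hT : total_positions ≠ 0 := by
      rcases hpre with h | h
      · exact h
      · omega
    obtain ⟨n, hn⟩ : ∃ n : Nat, steps = (n : Int) := ⟨steps.toNat, by omega⟩
    subst hn
    rw [loop_closed start total_positions direction hT n]
    rw [if_neg hs]
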